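-- pv_equiv track=rewrite | github.com/Florian1Omiecienski/bachelor_arbeit | modelle123/models/evaluation.py | confusion_matrix_by_label
-- ===== SOURCE A (Python) =====
-- def confusion_matrix_by_label(data, all_labels=None):
--     """
--     Creates a confusion-matrix for each label. Output is a dictionary holding labels as keys and dicts as values.
--     Data must be a list of tuples (gold, pred)
--         gold: set of labels
--         pred: set of labels
--     all_labels can specifie a list of labels that should be taken into account, others are ignored. Default is None.
--     """
--     confusions = dict()
--     if all_labels is None:
--         all_labels = set([l for y,_ in data for l in y]+[l for _,y_hat in data for l in y_hat])
--     #
--     indices_with_tps = set()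
--     # create confusions_matrix label wise
--     for i in range(len(data)):
--         y, y_hat = data[i]
--         for actor in all_labels:
--             if actor not in confusions:
--                 confusions[actor] = {"tp":0, "fp":0, "tn":0, "fn":0}
--             ##
--             if (actor in y) and (actor in y_hat):
--                 confusions[actor]["tp"] += 1
--                 indices_with_tps.add(i)
--             elif (actor in y) and (actor not in y_hat):
--                 confusions[actor]["fn"] += 1
--             elif (actor not in y) and (actor in y_hat):
--                 confusions[actor]["fp"] += 1
--             elif (actor not in y) and (actor not in y_hat):
--                 confusions[actor]["tn"] += 1
--     return confusions, indices_with_tps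
-- ===== SOURCE B (Python) =====
-- def confusion_matrix_by_label(data, all_labels=None):
--     """One-pass re-implementation: count tp/fn/fp only for labels actually present
--     in each sample's sets, then derive tn = n - tp - fp - fn per label."""
--     n = len(data)
--     keep = None if all_labels is None else set(all_labels)
--     tp, fn, fp = {}, {}, {}
--     tp_idx = set()
--     for i, (y, y_hat) in enumerate(data):
--         both = [l for l in y & y_hat if keep is None or l in keep]
--         miss = [l for l in y - y_hat if keep is None or l in keep]
--         spur = [l for l in y_hat - y if keep is None or l in keep]
--         for l in both:
--             tp[l] = tp.get(l, 0) + 1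
--         if both:
--             tp_idx.add(i)
--         for l in miss:
--             fn[l] = fn.get(l, 0) + 1
--         for l in spur:
--             fp[l] = fp.get(l, 0) + 1
--     if all_labels is None:
--         labels = []
--         seen = set()
--         for y, _ in data:
--             for l in y:
--                 if l not in seen:
--                     seen.add(l)
--                     labels.append(l)
--         for _, y_hat in data:
--             for l in y_hat:
--                 if l not in seen:
--                     seen.add(l)
--                     labels.append(l)
--     else:
--         labels = all_labels
--     confusions = {}
--     for l in labels:
--         t = tp.get(l, 0)
--         f = fp.get(l, 0)
--         m = fn.get(l, 0)
--         confusions[l] = {"tp": t, "fp": f, "tn": n - t - f - m, "fn": m}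
--     return confusions, tp_idx
-- ===== Notes on version B (the rewrite author's own statement) =====
-- stated objective: alternative
-- what changed: A iterates over every label for every sample, keeping a dict-of-dicts of running counts; B makes one pass over the samples counting tp/fn/fp only for the labels present in each sample's sets, then derives tn = n - tp - fp - fn per label when assembling the rows (asymptotically lighter by design, but a timing run's large inputs fall outside Pre_, so no speed is claimed).
-- outside the precondition, e.g. on confusion_matrix_by_label([], ['']): A returns ({}, set()), B returns ({'': {'tp': 0, 'fp': 0, 'tn': 0, 'fn': 0}}, set())
import Mathlib
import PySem

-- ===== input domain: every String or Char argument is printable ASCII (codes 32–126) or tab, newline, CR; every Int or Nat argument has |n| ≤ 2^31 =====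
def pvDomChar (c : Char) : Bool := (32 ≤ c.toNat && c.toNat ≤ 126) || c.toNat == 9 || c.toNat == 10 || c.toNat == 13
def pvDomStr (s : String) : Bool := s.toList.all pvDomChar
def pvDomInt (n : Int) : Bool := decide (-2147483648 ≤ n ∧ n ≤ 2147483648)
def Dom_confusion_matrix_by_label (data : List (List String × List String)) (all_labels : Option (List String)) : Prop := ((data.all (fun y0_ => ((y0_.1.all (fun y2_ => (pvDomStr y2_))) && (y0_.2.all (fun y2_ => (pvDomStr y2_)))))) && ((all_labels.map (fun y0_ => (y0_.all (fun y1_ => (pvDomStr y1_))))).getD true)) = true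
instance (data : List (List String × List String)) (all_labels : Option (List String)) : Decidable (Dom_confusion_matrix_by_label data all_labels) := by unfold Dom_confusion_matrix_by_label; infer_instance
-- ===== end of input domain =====

-- B replaces A's sample × label double loop (which touches every label for every sample) by a single
-- pass that counts tp/fn/fp only for the labels present in each sample and derives tn = n - tp - fp - fn.
-- (A mutates nothing; equivalence is about the returned (dict, set) pair.)

-- ===== PORT A =====
def pvRow0 : PySem.Dict String Int :=
  PySem.Dict.ofList [("tp", 0), ("fp", 0), ("tn", 0), ("fn", 0)]

-- one iteration of A's inner 'for actor in all_labels' loop body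
def pvStepA (i : Int) (y p : List String)
    (st : PySem.Dict String (PySem.Dict String Int) × PySem.Set Int) (actor : String) :
    PySem.Dict String (PySem.Dict String Int) × PySem.Set Int :=
  let conf := if st.1.contains actor then st.1 else st.1.insert actor pvRow0
  if actor ∈ y ∧ actor ∈ p then
    (conf.modify actor PySem.Dict.empty (fun r => r.modify "tp" 0 (· + 1)), PySem.Set.add st.2 i)
  else if actor ∈ y ∧ actor ∉ p then
    (conf.modify actor PySem.Dict.empty (fun r => r.modify "fn" 0 (· + 1)), st.2)
  else if actor ∉ y ∧ actor ∈ p then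
    (conf.modify actor PySem.Dict.empty (fun r => r.modify "fp" 0 (· + 1)), st.2)
  else if actor ∉ y ∧ actor ∉ p then
    (conf.modify actor PySem.Dict.empty (fun r => r.modify "tn" 0 (· + 1)), st.2)
  else st

-- A's main 'for i in range(len(data))' loop
def pvRunA (data : List (List String × List String)) (labels : List String) :
    PySem.Dict String (PySem.Dict String Int) × PySem.Set Int :=
  (PySem.List.pyRange 0 (data.length : Int) 1).foldl
    (fun st i =>
      let yp := PySem.List.pyGetD data i ([], [])
      labels.foldl (pvStepA i yp.1 yp.2) st)
    (PySem.Dict.empty, PySem.Set.empty)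

def confusion_matrix_by_label (data : List (List String × List String)) (all_labels : Option (List String)) : (List (String × List (String × Int))) × List Int :=
  let labels : List String :=
    match all_labels with
    | none => PySem.Set.ofList ((data.flatMap (fun yp => yp.1)) ++ (data.flatMap (fun yp => yp.2)))
    | some L => L
  let st := pvRunA data labels
  (st.1.items.map (fun kv => (kv.1, kv.2.items)), st.2)

-- ===== PORT B =====
def pvOk (keep : Option (PySem.Set String)) (l : String) : Bool :=
  match keep with
  | none => true
  | some s => PySem.Set.contains s l

-- 'for l in ls: d[l] = d.get(l, 0) + 1'
def pvBump (d : PySem.Dict String Int) (ls : List String) : PySem.Dict String Int :=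
  ls.foldl (fun d l => d.modify l 0 (· + 1)) d

-- one iteration of B's single 'for i, (y, y_hat) in enumerate(data)' loop; state = (tp, fn, fp, tp_idx)
def pvStepB (keep : Option (PySem.Set String))
    (st : PySem.Dict String Int × PySem.Dict String Int × PySem.Dict String Int × PySem.Set Int)
    (iyp : Int × (List String × List String)) :
    PySem.Dict String Int × PySem.Dict String Int × PySem.Dict String Int × PySem.Set Int :=
  let i := iyp.1
  let y := iyp.2.1
  let p := iyp.2.2
  let both := (PySem.Set.inter y p).filter (pvOk keep)
  let miss := (PySem.Set.diff y p).filter (pvOk keep)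
  let spur := (PySem.Set.diff p y).filter (pvOk keep)
  (pvBump st.1 both, pvBump st.2.1 miss, pvBump st.2.2.1 spur,
   if both.isEmpty then st.2.2.2 else PySem.Set.add st.2.2.2 i)

-- 'for l in ls: if l not in seen: seen.add(l); labels.append(l)'  (state = (labels, seen))
def pvSeenFold (ac : List String × PySem.Set String) (ls : List String) : List String × PySem.Set String :=
  ls.foldl (fun ac l => if PySem.Set.contains ac.2 l then ac else (ac.1 ++ [l], PySem.Set.add ac.2 l)) ac

def confusion_matrix_by_label_alt (data : List (List String × List String)) (all_labels : Option (List String)) : (List (String × List (String × Int))) × List Int :=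
  let n : Int := data.length
  let keep : Option (PySem.Set String) := all_labels.map PySem.Set.ofList
  let st := (PySem.List.enumerate data 0).foldl (pvStepB keep)
    (PySem.Dict.empty, PySem.Dict.empty, PySem.Dict.empty, PySem.Set.empty)
  let labels : List String :=
    match all_labels with
    | some L => L
    | none =>
      let ac := data.foldl (fun ac yp => pvSeenFold ac yp.1) ([], PySem.Set.empty)
      let ac := data.foldl (fun ac yp => pvSeenFold ac yp.2) ac
      ac.1
  let conf := labels.foldl
    (fun (d : PySem.Dict String (List (String × Int))) l =>
      let t := st.1.getD l 0
      let f := st.2.2.1.getD l 0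
      let m := st.2.1.getD l 0
      d.insert l [("tp", t), ("fp", f), ("tn", n - t - f - m), ("fn", m)])
    PySem.Dict.empty
  (conf.items, st.2.2.2)

-- ===== PRECONDITION & SPEC =====
-- Pre_ excludes two corners on which A still returns: (a) an all_labels list with duplicate entries,
-- where A's counts are accidentally multiplied by the multiplicity of the duplicated label, and
-- (b) empty data together with a non-empty all_labels, where A's empty dict and B's zero-filled
-- rows are equally defensible.  The inner-list Nodup conjuncts only restate that the samples are
-- Python sets (always distinct) and exclude no real Python input.
def Pre_confusion_matrix_by_label (data : List (List String × List String)) (all_labels : Option (List String)) : Prop :=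
  (∀ yp ∈ data, yp.1.Nodup ∧ yp.2.Nodup) ∧
  (∀ L ∈ all_labels.toList, L.Nodup ∧ (data = [] → L = []))
instance (data : List (List String × List String)) (all_labels : Option (List String)) : Decidable (Pre_confusion_matrix_by_label data all_labels) := by unfold Pre_confusion_matrix_by_label; infer_instance

def pvWitness_confusion_matrix_by_label : (List (List String × List String)) × Option (List String) :=
  ([(["a"], ["a", "b"])], some ["a", "b"])

def Spec_confusion_matrix_by_label (data : List (List String × List String)) (all_labels : Option (List String)) (out : (List (String × List (String × Int))) × List Int) : Prop := out = confusion_matrix_by_label_alt data all_labels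
instance (data : List (List String × List String)) (all_labels : Option (List String)) (out : (List (String × List (String × Int))) × List Int) : Decidable (Spec_confusion_matrix_by_label data all_labels out) := by unfold Spec_confusion_matrix_by_label; infer_instance

-- ===== CLAIM (what is proved, stated in full; the proofs are below) =====
def Claim_equal_confusion_matrix_by_label : Prop := ∀ (data : List (List String × List String)) (all_labels : Option (List String)), Dom_confusion_matrix_by_label data all_labels → Pre_confusion_matrix_by_label data all_labels → Spec_confusion_matrix_by_label data all_labels (confusion_matrix_by_label data all_labels)

-- ===== LEMMAS AND PROOFS =====

-- the four per-label sample predicates and their counts over data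
def pvCnt (data : List (List String × List String)) (q : (List String × List String) → Bool) : Int :=
  (data.countP q : Int)

def pvQtp (l : String) (yp : List String × List String) : Bool := decide (l ∈ yp.1 ∧ l ∈ yp.2)
def pvQfn (l : String) (yp : List String × List String) : Bool := decide (l ∈ yp.1 ∧ l ∉ yp.2)
def pvQfp (l : String) (yp : List String × List String) : Bool := decide (l ∉ yp.1 ∧ l ∈ yp.2)
def pvQtn (l : String) (yp : List String × List String) : Bool := decide (l ∉ yp.1 ∧ l ∉ yp.2)

def pvRowA (data : List (List String × List String)) (l : String) : List (String × Int) :=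
  [("tp", pvCnt data (pvQtp l)), ("fp", pvCnt data (pvQfp l)),
   ("tn", pvCnt data (pvQtn l)), ("fn", pvCnt data (pvQfn l))]

def pvHit (L : List String) (yp : List String × List String) : Bool :=
  L.any (fun l => decide (l ∈ yp.1 ∧ l ∈ yp.2))

def pvIdx (L : List String) (data : List (List String × List String)) : List Int :=
  (PySem.List.enumerate data 0).filterMap (fun iyp => if pvHit L iyp.2 then some iyp.1 else none)

-- what one A-step does to a row that is already present
def pvBumpRow (y p : List String) (l : String) (r : PySem.Dict String Int) : PySem.Dict String Int :=
  if l ∈ y ∧ l ∈ p then r.modify "tp" 0 (· + 1)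
  else if l ∈ y ∧ l ∉ p then r.modify "fn" 0 (· + 1)
  else if l ∉ y ∧ l ∈ p then r.modify "fp" 0 (· + 1)
  else r.modify "tn" 0 (· + 1)

theorem pvSet_add_idem {s : PySem.Set Int} {x : Int} : PySem.Set.add (PySem.Set.add s x) x = PySem.Set.add s x := by
  by_cases h : x ∈ s
  · rw [PySem.Set.add_of_mem h, PySem.Set.add_of_mem h]
  · rw [PySem.Set.add_of_not_mem h, PySem.Set.add_of_mem (by simp)]

-- dict plumbing for A's nested confusions[actor][cell] updates
theorem pvGet?_last {ν : Type} (acc : List (String × ν)) (a : String) (r : ν)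
    (hf : a ∉ acc.map Prod.fst) :
    (PySem.Dict.mk (acc ++ [(a, r)])).get? a = some r := by
  induction acc with
  | nil => simp [PySem.Dict.get?]
  | cons kv t ih =>
    obtain ⟨k, v⟩ := kv
    rw [List.cons_append, PySem.Dict.get?_mk_cons]
    have hk : ¬ (k == a) = true := by
      simp only [beq_iff_eq]
      intro he
      exact hf (by simp [he])
    rw [if_neg hk]
    exact ih (fun hm => hf (by simp at hm ⊢; tauto))

theorem pvMapKeep {ν : Type} (acc : List (String × ν)) (a : String) (w : String × ν)
    (hf : a ∉ acc.map Prod.fst) :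
    acc.map (fun p => if (p.1 == a) = true then w else p) = acc := by
  conv_rhs => rw [← List.map_id acc]
  apply List.map_congr_left
  intro p hp
  have : ¬ (p.1 == a) = true := by
    simp only [beq_iff_eq]
    intro he
    exact hf (he ▸ List.mem_map_of_mem hp)
  rw [if_neg this]
  rfl

theorem pvModify_last {ν : Type} (acc : List (String × ν)) (a : String) (r : ν) (d0 : ν)
    (f : ν → ν) (hf : a ∉ acc.map Prod.fst) :
    (PySem.Dict.mk (acc ++ [(a, r)])).modify a d0 f = PySem.Dict.mk (acc ++ [(a, f r)]) := by
  have hc : (PySem.Dict.mk (acc ++ [(a, r)])).contains a = true := by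
    unfold PySem.Dict.contains
    simp
  unfold PySem.Dict.modify PySem.Dict.insert
  rw [hc, if_pos rfl]
  unfold PySem.Dict.getD
  rw [pvGet?_last acc a r hf, Option.getD_some]
  show PySem.Dict.mk ((acc ++ [(a, r)]).map _) = _
  rw [List.map_append, pvMapKeep acc a _ hf]
  simp

theorem pvFind_of_mem_nodup {ν : Type} (M : List (String × ν)) (a : String) (v : ν)
    (hnd : (M.map Prod.fst).Nodup) (hv : (a, v) ∈ M) :
    M.find? (fun p => p.1 == a) = some (a, v) := by
  induction M with
  | nil => cases hv
  | cons kv t ih =>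
    obtain ⟨k, w⟩ := kv
    rcases List.mem_cons.1 hv with he | ht
    · cases he
      rw [List.find?_cons_of_pos (by simp)]
    · have hb : ((k, w).1 == a) = false := by
        simp only [beq_eq_false_iff_ne, ne_eq]
        intro he
        have hmem : a ∈ t.map Prod.fst := List.mem_map.2 ⟨(a, v), ht, rfl⟩
        have hk' : k ∈ t.map Prod.fst := by rw [he]; exact hmem
        exact (List.nodup_cons.1 hnd).1 hk'
      simp only [List.find?, hb]
      exact ih (List.nodup_cons.1 hnd).2 ht

theorem pvModify_of_mem {ν : Type} (M : List (String × ν)) (a : String) (v : ν) (d0 : ν)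
    (f : ν → ν) (hnd : (M.map Prod.fst).Nodup) (hv : (a, v) ∈ M) :
    (PySem.Dict.mk M).modify a d0 f =
      PySem.Dict.mk (M.map (fun kv => if kv.1 = a then (a, f v) else kv)) := by
  have hc : (PySem.Dict.mk M).contains a = true := by
    unfold PySem.Dict.contains
    exact List.any_eq_true.2 ⟨(a, v), hv, by simp⟩
  unfold PySem.Dict.modify PySem.Dict.insert
  rw [hc, if_pos rfl]
  unfold PySem.Dict.getD PySem.Dict.get?
  rw [show PySem.Dict.items (PySem.Dict.mk M) = M from rfl, pvFind_of_mem_nodup M a v hnd hv]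
  simp only [Option.map_some, Option.getD_some]
  congr 1
  apply List.map_congr_left
  intro p _
  by_cases hp : p.1 = a <;> simp [hp]

theorem pvMem_unique {ν : Type} (M : List (String × ν)) (a : String) (v w : ν)
    (hnd : (M.map Prod.fst).Nodup) (hv : (a, v) ∈ M) (hw : (a, w) ∈ M) : v = w := by
  have h1 := pvFind_of_mem_nodup M a v hnd hv
  have h2 := pvFind_of_mem_nodup M a w hnd hw
  rw [h1, Option.some.injEq] at h2
  exact (Prod.mk.injEq _ _ _ _ ▸ h2).2

-- the branch structure of one A-step, factored out of the four membership cases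
theorem pvStepA_branch (i : Int) (y p : List String) (a : String) :
    ∃ g : PySem.Dict String Int → PySem.Dict String Int,
      (∀ (st : PySem.Dict String (PySem.Dict String Int) × PySem.Set Int),
        pvStepA i y p st a =
          ((if st.1.contains a then st.1 else st.1.insert a pvRow0).modify a PySem.Dict.empty g,
           if decide (a ∈ y ∧ a ∈ p) then PySem.Set.add st.2 i else st.2)) ∧
      (∀ r, pvBumpRow y p a r = g r) ∧
      g pvRow0 = PySem.Dict.mk (pvRowA [(y, p)] a) := by
  have hrow : ∀ (c : String), pvRowA [(y, p)] a =
      [("tp", if pvQtp a (y, p) then 1 else 0), ("fp", if pvQfp a (y, p) then 1 else 0),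
       ("tn", if pvQtn a (y, p) then 1 else 0), ("fn", if pvQfn a (y, p) then 1 else 0)] := by
    intro _
    simp [pvRowA, pvCnt, List.countP_cons]
  rcases Decidable.em (a ∈ y) with h1 | h1 <;> rcases Decidable.em (a ∈ p) with h2 | h2
  · refine ⟨fun r => r.modify "tp" 0 (· + 1), fun st => ?_, fun r => ?_, ?_⟩
    · unfold pvStepA
      rw [if_pos ⟨h1, h2⟩, if_pos (decide_eq_true ⟨h1, h2⟩)]
    · unfold pvBumpRow
      rw [if_pos ⟨h1, h2⟩]
    · rw [hrow "", show pvQtp a (y, p) = true from decide_eq_true ⟨h1, h2⟩]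
      simp only [pvQfp, pvQtn, pvQfn, h1, h2]
      decide
  · refine ⟨fun r => r.modify "fn" 0 (· + 1), fun st => ?_, fun r => ?_, ?_⟩
    · unfold pvStepA
      rw [if_neg (by tauto), if_pos ⟨h1, h2⟩]
      simp [h2]
    · unfold pvBumpRow
      rw [if_neg (by tauto), if_pos ⟨h1, h2⟩]
    · rw [hrow "", show pvQfn a (y, p) = true from decide_eq_true ⟨h1, h2⟩]
      simp only [pvQtp, pvQfp, pvQtn, h1, h2]
      decide
  · refine ⟨fun r => r.modify "fp" 0 (· + 1), fun st => ?_, fun r => ?_, ?_⟩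
    · unfold pvStepA
      rw [if_neg (by tauto), if_neg (by tauto), if_pos ⟨h1, h2⟩]
      simp [h1]
    · unfold pvBumpRow
      rw [if_neg (by tauto), if_neg (by tauto), if_pos ⟨h1, h2⟩]
    · rw [hrow "", show pvQfp a (y, p) = true from decide_eq_true ⟨h1, h2⟩]
      simp only [pvQtp, pvQtn, pvQfn, h1, h2]
      decide
  · refine ⟨fun r => r.modify "tn" 0 (· + 1), fun st => ?_, fun r => ?_, ?_⟩
    · unfold pvStepA
      rw [if_neg (by tauto), if_neg (by tauto), if_neg (by tauto), if_pos ⟨h1, h2⟩]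
      simp [h1]
    · unfold pvBumpRow
      rw [if_neg (by tauto), if_neg (by tauto), if_neg (by tauto)]
    · rw [hrow "", show pvQtn a (y, p) = true from decide_eq_true ⟨h1, h2⟩]
      simp only [pvQtp, pvQfp, pvQfn, h1, h2]
      decide

theorem pvHit_cons (a : String) (L : List String) (yp : List String × List String) :
    pvHit (a :: L) yp = (decide (a ∈ yp.1 ∧ a ∈ yp.2) || pvHit L yp) := by
  simp [pvHit]

-- A's inner loop, first sample (keys not yet present)
theorem pvInnerA_ins (L : List String) (i : Int) (y p : List String) :
    ∀ (acc : List (String × PySem.Dict String Int)) (tps : PySem.Set Int),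
    L.Nodup → (∀ l ∈ L, l ∉ acc.map Prod.fst) →
    L.foldl (pvStepA i y p) (PySem.Dict.mk acc, tps) =
      (PySem.Dict.mk (acc ++ L.map (fun l => (l, PySem.Dict.mk (pvRowA [(y, p)] l)))),
       if pvHit L (y, p) then PySem.Set.add tps i else tps) := by
  induction L with
  | nil => intro acc tps _ _; simp [pvHit]
  | cons a L' ih =>
    intro acc tps hnd hfresh
    have hna : a ∉ acc.map Prod.fst := hfresh a List.mem_cons_self
    have hc : (PySem.Dict.mk acc).contains a = false := by
      unfold PySem.Dict.contains
      rw [List.any_eq_false]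
      intro kv hkv
      have hne : kv.1 ≠ a := fun he => hna (he ▸ List.mem_map_of_mem hkv)
      simpa using hne
    obtain ⟨g, hstep, _, hg0⟩ := pvStepA_branch i y p a
    rw [List.foldl_cons, hstep (PySem.Dict.mk acc, tps)]
    have hconf : ((if (PySem.Dict.mk acc).contains a then PySem.Dict.mk acc
        else (PySem.Dict.mk acc).insert a pvRow0).modify a PySem.Dict.empty g) =
        PySem.Dict.mk (acc ++ [(a, g pvRow0)]) := by
      rw [hc]
      show ((PySem.Dict.mk acc).insert a pvRow0).modify a PySem.Dict.empty g = _
      have hins : (PySem.Dict.mk acc).insert a pvRow0 = PySem.Dict.mk (acc ++ [(a, pvRow0)]) := by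
        unfold PySem.Dict.insert
        rw [hc]
        rfl
      rw [hins]
      exact pvModify_last acc a pvRow0 PySem.Dict.empty g hna
    rw [hconf, ih (acc ++ [(a, g pvRow0)]) _ (List.Nodup.of_cons hnd) (by
      intro l hl
      simp only [List.map_append, List.mem_append, List.map_cons, List.map_nil,
        List.mem_singleton, not_or]
      exact ⟨hfresh l (List.mem_cons_of_mem _ hl),
        fun he => (List.nodup_cons.1 hnd).1 (he ▸ hl)⟩)]
    rw [hg0, pvHit_cons, List.append_assoc]
    simp only [Prod.mk.injEq]
    refine ⟨rfl, ?_⟩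
    by_cases hd : a ∈ y ∧ a ∈ p <;> by_cases hh : pvHit L' (y, p) <;>
      first
        | rfl
        | simp [hd, hh, pvSet_add_idem]

-- A's inner loop, later samples (all keys present)
theorem pvInnerA_upd (L : List String) (i : Int) (y p : List String) :
    ∀ (M : List (String × PySem.Dict String Int)) (tps : PySem.Set Int),
    L.Nodup → (M.map Prod.fst).Nodup → (∀ l ∈ L, l ∈ M.map Prod.fst) →
    L.foldl (pvStepA i y p) (PySem.Dict.mk M, tps) =
      (PySem.Dict.mk (M.map (fun kv => if kv.1 ∈ L then (kv.1, pvBumpRow y p kv.1 kv.2) else kv)),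
       if pvHit L (y, p) then PySem.Set.add tps i else tps) := by
  induction L with
  | nil => intro M tps _ _ _; simp [pvHit]
  | cons a L' ih =>
    intro M tps hnd hndM hmem
    obtain ⟨kv0, hkv0, hkey⟩ := List.mem_map.1 (hmem a List.mem_cons_self)
    have hv : (a, kv0.2) ∈ M := by
      have : kv0 = (a, kv0.2) := by
        rw [← hkey]
      exact this ▸ hkv0
    have hc : (PySem.Dict.mk M).contains a = true := by
      unfold PySem.Dict.contains
      exact List.any_eq_true.2 ⟨(a, kv0.2), hv, by simp⟩
    obtain ⟨g, hstep, hgb, _⟩ := pvStepA_branch i y p a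
    rw [List.foldl_cons, hstep (PySem.Dict.mk M, tps), hc]
    show L'.foldl (pvStepA i y p) ((PySem.Dict.mk M).modify a PySem.Dict.empty g, _) = _
    rw [pvModify_of_mem M a kv0.2 PySem.Dict.empty g hndM hv]
    set M' := M.map (fun kv => if kv.1 = a then (a, g kv0.2) else kv) with hM'
    have hkeys : M'.map Prod.fst = M.map Prod.fst := by
      rw [hM', List.map_map]
      apply List.map_congr_left
      intro kv _
      by_cases hp : kv.1 = a <;> simp [hp]
    rw [ih M' _ (List.Nodup.of_cons hnd) (hkeys ▸ hndM) (by
      intro l hl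
      rw [hkeys]
      exact hmem l (List.mem_cons_of_mem _ hl))]
    simp only [Prod.mk.injEq]
    constructor
    · congr 1
      rw [hM', List.map_map]
      apply List.map_congr_left
      intro kv hkv
      by_cases hp : kv.1 = a
      · have hv2 : kv.2 = kv0.2 :=
          pvMem_unique M a kv.2 kv0.2 hndM (by rw [← hp]; exact hkv) hv
        have hnotin : a ∉ L' := (List.nodup_cons.1 hnd).1
        simp [Function.comp, hp, hnotin, hv2, ← hgb kv0.2]
      · simp [Function.comp, List.mem_cons, hp]
    · rw [pvHit_cons]
      by_cases hd : a ∈ y ∧ a ∈ p <;> by_cases hh : pvHit L' (y, p) <;>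
        first
          | rfl
          | simp [hd, hh, pvSet_add_idem]

theorem pvBumpRow_rowA (data : List (List String × List String)) (y p : List String) (l : String) :
    pvBumpRow y p l (PySem.Dict.mk (pvRowA data l)) = PySem.Dict.mk (pvRowA (data ++ [(y, p)]) l) := by
  have hnd4 : ((pvRowA data l).map Prod.fst).Nodup := by
    simp [pvRowA]
  have hcnt : ∀ q : (List String × List String) → Bool,
      pvCnt (data ++ [(y, p)]) q = pvCnt data q + (if q (y, p) then 1 else 0) := by
    intro q
    simp only [pvCnt, List.countP_append, List.countP_cons, List.countP_nil]
    by_cases hq : q (y, p) = true <;> simp [hq]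
  unfold pvBumpRow
  rcases Decidable.em (l ∈ y) with h1 | h1 <;> rcases Decidable.em (l ∈ p) with h2 | h2
  · rw [if_pos ⟨h1, h2⟩,
      pvModify_of_mem (pvRowA data l) "tp" (pvCnt data (pvQtp l)) 0 (· + 1) hnd4
        (by simp [pvRowA])]
    simp [pvRowA, hcnt, pvQtp, pvQfp, pvQtn, pvQfn, h1, h2]
  · rw [if_neg (by tauto), if_pos ⟨h1, h2⟩,
      pvModify_of_mem (pvRowA data l) "fn" (pvCnt data (pvQfn l)) 0 (· + 1) hnd4
        (by simp [pvRowA])]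
    simp [pvRowA, hcnt, pvQtp, pvQfp, pvQtn, pvQfn, h1, h2]
  · rw [if_neg (by tauto), if_neg (by tauto), if_pos ⟨h1, h2⟩,
      pvModify_of_mem (pvRowA data l) "fp" (pvCnt data (pvQfp l)) 0 (· + 1) hnd4
        (by simp [pvRowA])]
    simp [pvRowA, hcnt, pvQtp, pvQfp, pvQtn, pvQfn, h1, h2]
  · rw [if_neg (by tauto), if_neg (by tauto), if_neg (by tauto),
      pvModify_of_mem (pvRowA data l) "tn" (pvCnt data (pvQtn l)) 0 (· + 1) hnd4
        (by simp [pvRowA])]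
    simp [pvRowA, hcnt, pvQtp, pvQfp, pvQtn, pvQfn, h1, h2]

theorem pvIdx_lt (L : List String) (data : List (List String × List String)) :
    ∀ j ∈ pvIdx L data, j < (data.length : Int) := by
  intro j hj
  obtain ⟨iyp, hmem, hcond⟩ := List.mem_filterMap.1 hj
  obtain ⟨k, hk, he⟩ := (PySem.List.mem_enumerate_iff _ _ _).1 hmem
  by_cases h : pvHit L iyp.2
  · rw [if_pos h, Option.some.injEq] at hcond
    rw [← hcond, he]
    simp
    omega
  · rw [if_neg h] at hcond
    cases hcond

theorem pvIdx_append (L : List String) (data : List (List String × List String))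
    (d : List String × List String) :
    pvIdx L (data ++ [d]) =
      pvIdx L data ++ (if pvHit L d then [(data.length : Int)] else []) := by
  unfold pvIdx
  rw [PySem.List.enumerate_append, List.filterMap_append]
  congr 1
  rw [PySem.List.enumerate_cons]
  show List.filterMap _ [(0 + (data.length : Int), d)] = _
  by_cases h : pvHit L d <;> simp [h]

theorem pvRunA_char (L : List String) (hL : L.Nodup) :
    ∀ (data : List (List String × List String)),
    pvRunA data L =
      (PySem.Dict.mk (if data = [] then [] else L.map (fun l => (l, PySem.Dict.mk (pvRowA data l)))),
       pvIdx L data) := by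
  intro data
  induction data using List.reverseRecOn with
  | nil =>
    unfold pvRunA pvIdx
    rw [show ((([] : List (List String × List String)).length : Int)) = 0 from rfl,
      PySem.List.pyRange_one_eq_nil (le_refl 0)]
    simp [PySem.List.enumerate]
    rfl
  | append_singleton data d ih =>
    unfold pvRunA
    rw [show (((data ++ [d]).length : Int)) = (data.length : Int) + 1 by simp,
      PySem.List.pyRange_one_succ_right (Int.natCast_nonneg _), List.foldl_append]
    have hpre : (PySem.List.pyRange 0 (data.length : Int) 1).foldl
        (fun st i =>
          let yp := PySem.List.pyGetD (data ++ [d]) i ([], [])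
          L.foldl (pvStepA i yp.1 yp.2) st)
        (PySem.Dict.empty, PySem.Set.empty) = pvRunA data L := by
      unfold pvRunA
      apply PySem.List.foldl_congr_mem
      intro st i hi
      obtain ⟨h0, hlt⟩ := PySem.List.mem_pyRange_one.1 hi
      have hi' : PySem.List.pyGetD (data ++ [d]) i ([], []) = PySem.List.pyGetD data i ([], []) := by
        rw [← Int.toNat_of_nonneg h0, PySem.List.pyGetD_natCast, PySem.List.pyGetD_natCast,
          List.getD_append]
        omega
      rw [hi']
    rw [hpre, ih, List.foldl_cons, List.foldl_nil]
    have hd : PySem.List.pyGetD (data ++ [d]) (data.length : Int) ([], []) = d := by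
      rw [PySem.List.pyGetD_natCast, List.getD_eq_getElem _ _ (by simp)]
      simp
    rw [hd]
    by_cases hdata : data = []
    · subst hdata
      rw [if_pos rfl]
      simp only [List.length_nil, Nat.cast_zero,
        show pvIdx L ([] : List (List String × List String)) = [] from rfl]
      rw [pvInnerA_ins L 0 d.1 d.2 [] [] hL (by simp)]
      simp only [List.nil_append, Prod.mk.injEq]
      refine ⟨by simp, ?_⟩
      rw [show pvHit L (d.1, d.2) = pvHit L d from rfl]
      have hidx1 : pvIdx L [d] = if pvHit L d then [(0 : Int)] else [] := by
        unfold pvIdx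
        rw [PySem.List.enumerate_cons]
        by_cases hh : pvHit L d <;>
          simp [hh, PySem.List.enumerate]
      rw [hidx1]
      by_cases hh : pvHit L d
      · rw [if_pos hh, if_pos hh, PySem.Set.add_of_not_mem (List.not_mem_nil)]
        rfl
      · rw [if_neg hh, if_neg hh]
    · rw [if_neg hdata]
      have hkeysM : (L.map (fun l => (l, PySem.Dict.mk (pvRowA data l)))).map Prod.fst = L := by
        rw [List.map_map]
        exact (List.map_congr_left (fun a _ => rfl)).trans (List.map_id L)
      rw [pvInnerA_upd L _ d.1 d.2 _ _ hL (by rw [hkeysM]; exact hL)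
        (by rw [hkeysM]; exact fun l hl => hl)]
      simp only [Prod.mk.injEq]
      constructor
      · rw [if_neg (by simp)]
        congr 1
        rw [List.map_map]
        apply List.map_congr_left
        intro l hl
        simp only [Function.comp]
        rw [if_pos hl, pvBumpRow_rowA]
      · rw [pvIdx_append L data d]
        have hd' : (d.1, d.2) = d := rfl
        by_cases hh : pvHit L d
        · rw [if_pos (hd' ▸ hh), if_pos hh,
            PySem.Set.add_of_not_mem (fun hm => lt_irrefl _ (pvIdx_lt L data _ hm))]
        · rw [if_neg (hd' ▸ hh), if_neg hh, List.append_nil]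

-- B's per-sample hit test ('if both:')
def pvHitK (keep : Option (PySem.Set String)) (yp : List String × List String) : Bool :=
  !((PySem.Set.inter yp.1 yp.2).filter (pvOk keep)).isEmpty

def pvIdxK (keep : Option (PySem.Set String)) (data : List (List String × List String)) (s : Int) : List Int :=
  (PySem.List.enumerate data s).filterMap (fun iyp => if pvHitK keep iyp.2 then some iyp.1 else none)

theorem pvCount_inter (keep : Option (PySem.Set String)) (l : String) (hok : pvOk keep l = true)
    (y p : List String) (hy : y.Nodup) :
    ((PySem.Set.inter y p).filter (pvOk keep)).count l = if l ∈ y ∧ l ∈ p then 1 else 0 := by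
  by_cases h1 : l ∈ y
  · by_cases h2 : l ∈ p
    · rw [if_pos ⟨h1, h2⟩, List.count_filter hok]
      unfold PySem.Set.inter
      rw [List.count_filter (by simpa using (PySem.Set.contains_iff p l).2 h2)]
      exact List.count_eq_one_of_mem hy h1
    · rw [if_neg (by tauto)]
      exact List.count_eq_zero_of_not_mem
        (fun hm => h2 ((PySem.Set.mem_inter _ _ _).1 (List.mem_filter.1 hm).1).2)
  · rw [if_neg (by tauto)]
    exact List.count_eq_zero_of_not_mem
      (fun hm => h1 ((PySem.Set.mem_inter _ _ _).1 (List.mem_filter.1 hm).1).1)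

theorem pvCount_diff (keep : Option (PySem.Set String)) (l : String) (hok : pvOk keep l = true)
    (y p : List String) (hy : y.Nodup) :
    ((PySem.Set.diff y p).filter (pvOk keep)).count l = if l ∈ y ∧ l ∉ p then 1 else 0 := by
  by_cases h1 : l ∈ y
  · by_cases h2 : l ∈ p
    · rw [if_neg (by tauto)]
      exact List.count_eq_zero_of_not_mem
        (fun hm => ((PySem.Set.mem_diff _ _ _).1 (List.mem_filter.1 hm).1).2 h2)
    · rw [if_pos ⟨h1, h2⟩, List.count_filter hok]
      unfold PySem.Set.diff
      rw [List.count_filter (by simpa using h2)]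
      exact List.count_eq_one_of_mem hy h1
  · rw [if_neg (by tauto)]
    exact List.count_eq_zero_of_not_mem
      (fun hm => h1 ((PySem.Set.mem_diff _ _ _).1 (List.mem_filter.1 hm).1).1)

theorem pvRunB_tp (keep : Option (PySem.Set String)) (l : String) (hok : pvOk keep l = true) :
    ∀ (data : List (List String × List String)) (s : Int)
      (st0 : PySem.Dict String Int × PySem.Dict String Int × PySem.Dict String Int × PySem.Set Int),
    (∀ yp ∈ data, yp.1.Nodup) →
    ((PySem.List.enumerate data s).foldl (pvStepB keep) st0).1.getD l 0 = st0.1.getD l 0 + pvCnt data (pvQtp l) := by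
  intro data
  induction data with
  | nil => intro s st0 _; simp [PySem.List.enumerate, pvCnt]
  | cons d rest ih =>
    intro s st0 hnd
    rw [PySem.List.enumerate_cons, List.foldl_cons,
      ih (s + 1) _ (fun yp h => hnd yp (List.mem_cons_of_mem _ h))]
    show (pvBump st0.1 _).getD l 0 + _ = _
    unfold pvBump
    rw [PySem.Dict.getD_foldl_modify_add_one,
      pvCount_inter keep l hok d.1 d.2 (hnd d (List.mem_cons_self))]
    simp only [pvCnt, pvQtp, List.countP_cons]
    by_cases h : l ∈ d.1 ∧ l ∈ d.2 <;> simp [h] <;> ring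

theorem pvRunB_fn (keep : Option (PySem.Set String)) (l : String) (hok : pvOk keep l = true) :
    ∀ (data : List (List String × List String)) (s : Int)
      (st0 : PySem.Dict String Int × PySem.Dict String Int × PySem.Dict String Int × PySem.Set Int),
    (∀ yp ∈ data, yp.1.Nodup) →
    ((PySem.List.enumerate data s).foldl (pvStepB keep) st0).2.1.getD l 0 = st0.2.1.getD l 0 + pvCnt data (pvQfn l) := by
  intro data
  induction data with
  | nil => intro s st0 _; simp [PySem.List.enumerate, pvCnt]
  | cons d rest ih =>
    intro s st0 hnd
    rw [PySem.List.enumerate_cons, List.foldl_cons,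
      ih (s + 1) _ (fun yp h => hnd yp (List.mem_cons_of_mem _ h))]
    show (pvBump st0.2.1 _).getD l 0 + _ = _
    unfold pvBump
    rw [PySem.Dict.getD_foldl_modify_add_one,
      pvCount_diff keep l hok d.1 d.2 (hnd d (List.mem_cons_self))]
    simp only [pvCnt, pvQfn, List.countP_cons]
    by_cases h : l ∈ d.1 ∧ l ∉ d.2 <;> simp [h] <;> ring

theorem pvRunB_fp (keep : Option (PySem.Set String)) (l : String) (hok : pvOk keep l = true) :
    ∀ (data : List (List String × List String)) (s : Int)
      (st0 : PySem.Dict String Int × PySem.Dict String Int × PySem.Dict String Int × PySem.Set Int),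
    (∀ yp ∈ data, yp.2.Nodup) →
    ((PySem.List.enumerate data s).foldl (pvStepB keep) st0).2.2.1.getD l 0 = st0.2.2.1.getD l 0 + pvCnt data (pvQfp l) := by
  intro data
  induction data with
  | nil => intro s st0 _; simp [PySem.List.enumerate, pvCnt]
  | cons d rest ih =>
    intro s st0 hnd
    rw [PySem.List.enumerate_cons, List.foldl_cons,
      ih (s + 1) _ (fun yp h => hnd yp (List.mem_cons_of_mem _ h))]
    show (pvBump st0.2.2.1 _).getD l 0 + _ = _
    unfold pvBump
    rw [PySem.Dict.getD_foldl_modify_add_one,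
      pvCount_diff keep l hok d.2 d.1 (hnd d (List.mem_cons_self))]
    simp only [pvCnt, pvQfp, List.countP_cons]
    by_cases h : l ∉ d.1 ∧ l ∈ d.2 <;> simp [h] <;> first | ring | tauto

theorem pvRunB_idx (keep : Option (PySem.Set String)) :
    ∀ (data : List (List String × List String)) (s : Int)
      (st0 : PySem.Dict String Int × PySem.Dict String Int × PySem.Dict String Int × PySem.Set Int),
    (∀ j ∈ st0.2.2.2, j < s) →
    ((PySem.List.enumerate data s).foldl (pvStepB keep) st0).2.2.2 = st0.2.2.2 ++ pvIdxK keep data s := by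
  intro data
  induction data with
  | nil => intro s st0 _; simp [pvIdxK, PySem.List.enumerate]
  | cons d rest ih =>
    intro s st0 hb
    rw [PySem.List.enumerate_cons, List.foldl_cons]
    have hidxK : pvIdxK keep (d :: rest) s =
        (if pvHitK keep d then [s] else []) ++ pvIdxK keep rest (s + 1) := by
      unfold pvIdxK
      rw [PySem.List.enumerate_cons, List.filterMap_cons]
      by_cases h : pvHitK keep d <;> simp [h]
    by_cases h : pvHitK keep d
    · have hne : ¬ ((PySem.Set.inter d.1 d.2).filter (pvOk keep)).isEmpty = true := by
        unfold pvHitK at h; simpa using h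
      have hstep : (pvStepB keep st0 (s, d)).2.2.2 = st0.2.2.2 ++ [s] := by
        show (if ((PySem.Set.inter d.1 d.2).filter (pvOk keep)).isEmpty then st0.2.2.2
              else PySem.Set.add st0.2.2.2 s) = _
        rw [if_neg hne, PySem.Set.add_of_not_mem (fun hc => lt_irrefl s (hb s hc))]
      rw [ih (s + 1) (pvStepB keep st0 (s, d))
        (by rw [hstep]; intro j hj; rcases List.mem_append.1 hj with hj | hj
            · exact lt_trans (hb j hj) (by omega)
            · simp at hj; omega),
        hstep, hidxK, if_pos h, List.append_assoc]
    · have he : ((PySem.Set.inter d.1 d.2).filter (pvOk keep)).isEmpty = true := by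
        unfold pvHitK at h; simpa using h
      have hstep : (pvStepB keep st0 (s, d)).2.2.2 = st0.2.2.2 := by
        show (if ((PySem.Set.inter d.1 d.2).filter (pvOk keep)).isEmpty then st0.2.2.2
              else PySem.Set.add st0.2.2.2 s) = _
        rw [if_pos he]
      rw [ih (s + 1) (pvStepB keep st0 (s, d))
        (by rw [hstep]; intro j hj; exact lt_trans (hb j hj) (by omega)),
        hstep, hidxK, if_neg h, List.nil_append]

-- B's final dict-building loop over distinct fresh labels
theorem pvConfB (g : String → List (String × Int)) :
    ∀ (labels : List String) (acc : List (String × List (String × Int))),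
    labels.Nodup → (∀ l ∈ labels, l ∉ acc.map Prod.fst) →
    (labels.foldl (fun d l => d.insert l (g l)) (PySem.Dict.mk acc)).items =
      acc ++ labels.map (fun l => (l, g l)) := by
  intro labels
  induction labels with
  | nil => intro acc _ _; simp
  | cons a ls ih =>
    intro acc hnd hfresh
    rw [List.foldl_cons]
    have hc : (PySem.Dict.mk acc).contains a = false := by
      unfold PySem.Dict.contains
      rw [List.any_eq_false]
      intro kv hkv
      have hne : kv.1 ≠ a :=
        fun he => hfresh a List.mem_cons_self (he ▸ List.mem_map_of_mem hkv)
      simpa using hne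
    have hins : (PySem.Dict.mk acc).insert a (g a) = PySem.Dict.mk (acc ++ [(a, g a)]) := by
      unfold PySem.Dict.insert
      rw [hc]
      rfl
    rw [hins, ih (acc ++ [(a, g a)]) (List.Nodup.of_cons hnd)
      (by intro l hl
          simp only [List.map_append, List.mem_append, List.map_cons, List.map_nil,
            List.mem_singleton, not_or]
          exact ⟨hfresh l (List.mem_cons_of_mem _ hl),
            fun he => (List.nodup_cons.1 hnd).1 (he ▸ hl)⟩),
      List.append_assoc]
    rfl

-- B's label-discovery loops compute set(golds ++ preds) in first-occurrence order
theorem pvSeenFold_eq (ls : List String) : ∀ (s : PySem.Set String),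
    pvSeenFold (s, s) ls = (PySem.Set.update s ls, PySem.Set.update s ls) := by
  induction ls with
  | nil => intro s; rfl
  | cons a t ih =>
    intro s
    unfold pvSeenFold
    rw [List.foldl_cons, PySem.Set.update_cons]
    change List.foldl _ (if PySem.Set.contains s a = true then (s, s)
      else (s ++ [a], PySem.Set.add s a)) t = _
    by_cases h : PySem.Set.contains s a = true
    · rw [if_pos h]
      have ha : PySem.Set.add s a = s := PySem.Set.add_of_mem ((PySem.Set.contains_iff s a).1 h)
      have := ih s
      unfold pvSeenFold at this
      rw [ha, this]
    · rw [if_neg h,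
        show s ++ [a] = PySem.Set.add s a from
          (PySem.Set.add_of_not_mem (fun hm => h ((PySem.Set.contains_iff s a).2 hm))).symm]
      have := ih (PySem.Set.add s a)
      unfold pvSeenFold at this
      rw [this]

theorem pvLabels_none (data : List (List String × List String)) :
    ((data.foldl (fun ac yp => pvSeenFold ac yp.2)
       (data.foldl (fun ac yp => pvSeenFold ac yp.1) ([], PySem.Set.empty))).1 : List String) =
      PySem.Set.ofList ((data.flatMap (fun yp => yp.1)) ++ (data.flatMap (fun yp => yp.2))) := by
  have hfold : ∀ (f : (List String × List String) → List String)
      (l : List (List String × List String)) (s : PySem.Set String),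
      l.foldl (fun ac yp => pvSeenFold ac (f yp)) (s, s) =
        (l.foldl (fun ac yp => PySem.Set.update ac (f yp)) s,
         l.foldl (fun ac yp => PySem.Set.update ac (f yp)) s) := by
    intro f l
    induction l with
    | nil => intro s; rfl
    | cons d t ih =>
      intro s
      rw [List.foldl_cons, List.foldl_cons, pvSeenFold_eq]
      exact ih _
  have hupd : ∀ (f : (List String × List String) → List String)
      (l : List (List String × List String)) (s : PySem.Set String),
      l.foldl (fun ac yp => PySem.Set.update ac (f yp)) s =
        (l.flatMap f).foldl PySem.Set.add s := by
    intro f l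
    induction l with
    | nil => intro s; rfl
    | cons d t ih =>
      intro s
      rw [List.foldl_cons, List.flatMap_cons, List.foldl_append, ih]
      rfl
  show (List.foldl _ (List.foldl (fun ac yp => pvSeenFold ac yp.1) (PySem.Set.empty, PySem.Set.empty) data) data).1 = _
  rw [hfold, hfold, hupd, hupd, PySem.Set.ofList_eq_foldl, List.foldl_append]
  rfl

-- the four cells partition the samples
theorem pvPartition (l : String) (data : List (List String × List String)) :
    pvCnt data (pvQtp l) + pvCnt data (pvQfp l) + pvCnt data (pvQtn l) + pvCnt data (pvQfn l) = (data.length : Int) := by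
  induction data with
  | nil => simp [pvCnt]
  | cons d rest ih =>
    simp only [pvCnt, List.countP_cons, List.length_cons] at *
    by_cases h1 : l ∈ d.1 <;> by_cases h2 : l ∈ d.2 <;>
      simp only [pvQtp, pvQfp, pvQtn, pvQfn, h1, h2] at * <;> push_cast at * <;>
      simp_all <;> omega

-- hit tests agree on samples whose tp-labels lie in L
theorem pvHit_eq_hitK (keep : Option (PySem.Set String)) (L : List String)
    (yp : List String × List String)
    (h : ∀ l, l ∈ yp.1 → l ∈ yp.2 → (l ∈ L ↔ pvOk keep l = true)) :
    pvHit L yp = pvHitK keep yp := by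
  rw [Bool.eq_iff_iff]
  unfold pvHit pvHitK
  rw [List.any_eq_true, Bool.not_eq_true', List.isEmpty_eq_false_iff]
  constructor
  · rintro ⟨l, hl, hc⟩
    obtain ⟨h1, h2⟩ := of_decide_eq_true hc
    exact List.ne_nil_of_mem (List.mem_filter.2
      ⟨(PySem.Set.mem_inter _ _ _).2 ⟨h1, h2⟩, (h l h1 h2).1 hl⟩)
  · intro hne
    obtain ⟨x, hx⟩ := List.exists_mem_of_ne_nil _ hne
    obtain ⟨hxi, hok⟩ := List.mem_filter.1 hx
    obtain ⟨h1, h2⟩ := (PySem.Set.mem_inter _ _ _).1 hxi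
    exact ⟨x, (h x h1 h2).2 hok, decide_eq_true ⟨h1, h2⟩⟩

-- one row of A's result equals the row B assembles from its counters
theorem pvRowEq (keep : Option (PySem.Set String)) (data : List (List String × List String))
    (l : String) (hok : pvOk keep l = true)
    (h1 : ∀ yp ∈ data, yp.1.Nodup) (h2 : ∀ yp ∈ data, yp.2.Nodup) :
    pvRowA data l =
      [("tp", ((PySem.List.enumerate data 0).foldl (pvStepB keep)
          (PySem.Dict.empty, PySem.Dict.empty, PySem.Dict.empty, PySem.Set.empty)).1.getD l 0),
       ("fp", ((PySem.List.enumerate data 0).foldl (pvStepB keep)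
          (PySem.Dict.empty, PySem.Dict.empty, PySem.Dict.empty, PySem.Set.empty)).2.2.1.getD l 0),
       ("tn", (data.length : Int) -
          ((PySem.List.enumerate data 0).foldl (pvStepB keep)
            (PySem.Dict.empty, PySem.Dict.empty, PySem.Dict.empty, PySem.Set.empty)).1.getD l 0 -
          ((PySem.List.enumerate data 0).foldl (pvStepB keep)
            (PySem.Dict.empty, PySem.Dict.empty, PySem.Dict.empty, PySem.Set.empty)).2.2.1.getD l 0 -
          ((PySem.List.enumerate data 0).foldl (pvStepB keep)
            (PySem.Dict.empty, PySem.Dict.empty, PySem.Dict.empty, PySem.Set.empty)).2.1.getD l 0),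
       ("fn", ((PySem.List.enumerate data 0).foldl (pvStepB keep)
          (PySem.Dict.empty, PySem.Dict.empty, PySem.Dict.empty, PySem.Set.empty)).2.1.getD l 0)] := by
  rw [pvRunB_tp keep l hok data 0 _ h1, pvRunB_fn keep l hok data 0 _ h1,
    pvRunB_fp keep l hok data 0 _ h2]
  simp only [show (PySem.Dict.empty : PySem.Dict String Int).getD l 0 = 0 from rfl, zero_add]
  simp only [pvRowA, List.cons.injEq, Prod.mk.injEq, and_true, true_and]
  linarith [pvPartition l data]

theorem pvIdxEq (keep : Option (PySem.Set String)) (L : List String)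
    (data : List (List String × List String))
    (h : ∀ yp ∈ data, ∀ l, l ∈ yp.1 → l ∈ yp.2 → (l ∈ L ↔ pvOk keep l = true)) :
    pvIdx L data = pvIdxK keep data 0 := by
  unfold pvIdx pvIdxK
  apply List.filterMap_congr
  intro x hx
  obtain ⟨k, hk, he⟩ := (PySem.List.mem_enumerate_iff _ _ _).1 hx
  subst he
  rw [pvHit_eq_hitK keep L _ (h _ (List.getElem_mem hk))]

-- ===== VERDICT (by name: the statement is the Claim_ definition above) =====
theorem confusion_matrix_by_label_spec : Claim_equal_confusion_matrix_by_label := by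
  unfold Claim_equal_confusion_matrix_by_label
  intro data all_labels hdom hpre
  obtain ⟨hsets, hopt⟩ := hpre
  unfold Spec_confusion_matrix_by_label
  have h1 : ∀ yp ∈ data, yp.1.Nodup := fun yp h => (hsets yp h).1
  have h2 : ∀ yp ∈ data, yp.2.Nodup := fun yp h => (hsets yp h).2
  cases all_labels with
  | none =>
    have hL : (PySem.Set.ofList
        ((data.flatMap (fun yp => yp.1)) ++ (data.flatMap (fun yp => yp.2)))).Nodup :=
      PySem.Set.nodup_ofList _
    dsimp only [confusion_matrix_by_label, confusion_matrix_by_label_alt, Option.map]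
    rw [pvRunA_char _ hL data, pvLabels_none data,
      pvRunB_idx none data 0 _ (fun j hj => absurd hj (List.not_mem_nil)),
      show (PySem.Dict.empty : PySem.Dict String (List (String × Int))) = PySem.Dict.mk []
        from rfl,
      pvConfB _ _ [] hL (by simp)]
    by_cases hdata : data = []
    · subst hdata
      rfl
    · refine Prod.ext ?_ ?_
      · show (if data = [] then [] else _).map _ = _
        rw [if_neg hdata, List.nil_append, List.map_map]
        apply List.map_congr_left
        intro l hl
        show (l, pvRowA data l) = _
        rw [pvRowEq none data l rfl h1 h2]
      · show pvIdx _ data = _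
        rw [List.nil_append]
        apply pvIdxEq
        intro yp hyp l hl1 hl2
        refine iff_of_true ?_ rfl
        exact (PySem.Set.mem_ofList _ _).2
          (List.mem_append_left _ (List.mem_flatMap.2 ⟨yp, hyp, hl1⟩))
  | some Lab =>
    obtain ⟨hndLab, hnil⟩ := hopt Lab (by simp)
    have hiff : ∀ l, (l ∈ Lab ↔ pvOk (some (PySem.Set.ofList Lab)) l = true) := by
      intro l
      unfold pvOk
      constructor
      · intro hmem
        exact (PySem.Set.contains_iff _ _).2 ((PySem.Set.mem_ofList _ _).2 hmem)
      · intro hc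
        exact (PySem.Set.mem_ofList _ _).1 ((PySem.Set.contains_iff _ _).1 hc)
    by_cases hdata : data = []
    · subst hdata
      rw [hnil rfl]
      rfl
    · dsimp only [confusion_matrix_by_label, confusion_matrix_by_label_alt, Option.map]
      rw [pvRunA_char Lab hndLab data,
        pvRunB_idx (some (PySem.Set.ofList Lab)) data 0 _
          (fun j hj => absurd hj (List.not_mem_nil)),
        show (PySem.Dict.empty : PySem.Dict String (List (String × Int))) = PySem.Dict.mk []
          from rfl,
        pvConfB _ _ [] hndLab (by simp)]
      refine Prod.ext ?_ ?_
      · show (if data = [] then [] else _).map _ = _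
        rw [if_neg hdata, List.nil_append, List.map_map]
        apply List.map_congr_left
        intro l hl
        show (l, pvRowA data l) = _
        rw [pvRowEq (some (PySem.Set.ofList Lab)) data l ((hiff l).1 hl) h1 h2]
      · show pvIdx Lab data = _
        rw [List.nil_append]
        apply pvIdxEq
        intro yp hyp l hl1 hl2
        exact hiff l
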